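-- pv_equiv track=rewrite | github.com/dolittle007/ont_chopper | src/ont_chopper/algorithm/score_handler.py | find_numbers_less_and_greater
-- ===== SOURCE A (Python) =====
-- from typing import Tuple
--
-- def find_numbers_less_and_greater(numbers, target) -> Tuple:
--     """the first number that is less than and the first number that
--         is greater than a target number in a list of numbers
--     :param numbers: a list of numbers
--     :param target: the target number
--     :type numbers: list
--     :type target: int
--     :rtype: tuple
--     """
--
--     less_than_target = None
--     greater_than_target = None
--
--     for num in numbers:
--         if num < target:
--             if less_than_target is None or num > less_than_target:
--                 less_than_target = num
--         elif num > target: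
--             if greater_than_target is None or num < greater_than_target:
--                 greater_than_target = num
--
--     return less_than_target, greater_than_target
-- ===== SOURCE B (Python) =====
-- def find_numbers_less_and_greater(numbers, target):
--     numbers = list(numbers)
--     below = [n for n in numbers if n < target]
--     above = [n for n in numbers if n > target]
--     return (max(below) if below else None, min(above) if above else None)
-- ===== Notes on version B (the rewrite author's own statement) =====
-- stated objective: simpler
-- what changed: B replaces A's single loop tracking two running candidates with two filtered lists whose extremes are delegated to max/min.
import Mathlib
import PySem

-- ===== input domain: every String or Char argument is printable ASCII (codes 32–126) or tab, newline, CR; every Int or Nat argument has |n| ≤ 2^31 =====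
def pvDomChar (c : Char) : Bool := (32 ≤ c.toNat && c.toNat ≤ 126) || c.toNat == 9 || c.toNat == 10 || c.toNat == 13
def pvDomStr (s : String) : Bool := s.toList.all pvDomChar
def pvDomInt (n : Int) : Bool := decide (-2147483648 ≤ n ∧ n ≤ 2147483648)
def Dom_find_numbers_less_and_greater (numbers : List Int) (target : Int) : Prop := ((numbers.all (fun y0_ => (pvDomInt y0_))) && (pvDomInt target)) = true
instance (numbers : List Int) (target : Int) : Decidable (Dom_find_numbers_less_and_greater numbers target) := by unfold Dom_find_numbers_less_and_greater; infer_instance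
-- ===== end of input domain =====

-- ===== PORT A =====
-- B: two filtered lists with max/min instead of one loop tracking two running candidates (simpler decomposition).
def find_numbers_less_and_greater (numbers : List Int) (target : Int) : Option Int × Option Int :=
  numbers.foldl (fun st num =>
    if num < target then
      match st.1 with
      | none => (some num, st.2)
      | some l => if num > l then (some num, st.2) else st
    else if num > target then
      match st.2 with
      | none => (st.1, some num)
      | some g => if num < g then (st.1, some num) else st
    else st) (none, none)

-- ===== PORT B =====
def find_numbers_less_and_greater_alt (numbers : List Int) (target : Int) : Option Int × Option Int :=
  (PySem.List.max? (numbers.filter (fun n => n < target)) (fun x => x),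
   PySem.List.min? (numbers.filter (fun n => n > target)) (fun x => x))

-- ===== PRECONDITION & SPEC =====
def Spec_find_numbers_less_and_greater (numbers : List Int) (target : Int) (out : Option Int × Option Int) : Prop := out = find_numbers_less_and_greater_alt numbers target
instance (numbers : List Int) (target : Int) (out : Option Int × Option Int) : Decidable (Spec_find_numbers_less_and_greater numbers target out) := by unfold Spec_find_numbers_less_and_greater; infer_instance

-- ===== CLAIM (what is proved, stated in full; the proofs are below) =====
def Claim_equal_find_numbers_less_and_greater : Prop := ∀ (numbers : List Int) (target : Int), Dom_find_numbers_less_and_greater numbers target → Spec_find_numbers_less_and_greater numbers target (find_numbers_less_and_greater numbers target)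

-- ===== LEMMAS AND PROOFS =====

-- ===== VERDICT (by name: the statement is the Claim_ definition above) =====

def gmax (a : Option Int) (xs : List Int) : Option Int :=
  xs.foldl (fun acc n => match acc with
    | none => some n
    | some l => if n > l then some n else acc) a

def gmin (a : Option Int) (xs : List Int) : Option Int :=
  xs.foldl (fun acc n => match acc with
    | none => some n
    | some g => if n < g then some n else acc) a

theorem foldl_split (target : Int) (l : List Int) : ∀ a b : Option Int,
    l.foldl (fun st num =>
      if num < target then
        match st.1 with
        | none => (some num, st.2)
        | some l => if num > l then (some num, st.2) else st
      else if num > target then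
        match st.2 with
        | none => (st.1, some num)
        | some g => if num < g then (st.1, some num) else st
      else st) (a, b)
    = (gmax a (l.filter (fun n => n < target)), gmin b (l.filter (fun n => n > target))) := by
  induction l with
  | nil => intro a b; simp [gmax, gmin]
  | cons x t ih =>
    intro a b
    by_cases hlt : x < target
    · have hgt : ¬ x > target := by omega
      cases a with
      | none => simp [List.foldl_cons, hlt, hgt, ih, gmax]
      | some l =>
        by_cases h : x > l <;> simp [List.foldl_cons, hlt, hgt, h, ih, gmax]
    · by_cases hgt : x > target
      · cases b with
        | none => simp [List.foldl_cons, hlt, hgt, ih, gmin]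
        | some g =>
          by_cases h : x < g <;> simp [List.foldl_cons, hlt, hgt, h, ih, gmin]
      · simp [List.foldl_cons, hlt, hgt, ih]

theorem gmax_some (t : List Int) : ∀ m : Int, gmax (some m) t = some (t.foldl max m) := by
  induction t with
  | nil => intro m; simp [gmax]
  | cons x xs ih =>
    intro m
    by_cases h : x > m
    · simp only [gmax, List.foldl_cons] at *
      simp [h, ih, max_eq_right (le_of_lt h)]
    · simp only [gmax, List.foldl_cons] at *
      simp [h, ih, max_eq_left (by omega : x ≤ m)]

theorem gmin_some (t : List Int) : ∀ m : Int, gmin (some m) t = some (t.foldl min m) := by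
  induction t with
  | nil => intro m; simp [gmin]
  | cons x xs ih =>
    intro m
    by_cases h : x < m
    · simp only [gmin, List.foldl_cons] at *
      simp [h, ih, min_eq_right (le_of_lt h)]
    · simp only [gmin, List.foldl_cons] at *
      simp [h, ih, min_eq_left (by omega : m ≤ x)]

theorem gmax_none_eq_max? (xs : List Int) : gmax none xs = PySem.List.max? xs (fun x => x) := by
  cases xs with
  | nil => simp [gmax, PySem.List.max?]
  | cons x t =>
    have : gmax none (x :: t) = gmax (some x) t := by simp [gmax, List.foldl_cons]
    rw [this, gmax_some, PySem.List.max?_id_cons]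

theorem gmin_none_eq_min? (xs : List Int) : gmin none xs = PySem.List.min? xs (fun x => x) := by
  cases xs with
  | nil => simp [gmin, PySem.List.min?]
  | cons x t =>
    have : gmin none (x :: t) = gmin (some x) t := by simp [gmin, List.foldl_cons]
    rw [this, gmin_some, PySem.List.min?_id_cons]

-- ===== VERDICT =====
theorem find_numbers_less_and_greater_spec : Claim_equal_find_numbers_less_and_greater := by
  intro numbers target _
  unfold Spec_find_numbers_less_and_greater find_numbers_less_and_greater find_numbers_less_and_greater_alt
  rw [foldl_split, gmax_none_eq_max?, gmin_none_eq_min?]
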